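-- pv_equiv track=rewrite | github.com/BeepingBusyBeaver/scan2sim | scripts/parser/run_parser_decoder.py | _infer_frame_offset
-- ===== SOURCE A (Python) =====
-- from typing import Any, Dict, List, Mapping, Sequence, Tuple
--
-- def _infer_frame_offset(pred_numeric_keys: Sequence[int], gt_frames: Sequence[int]) -> int:
--     pred_set = set(pred_numeric_keys)
--     gt_set = set(gt_frames)
--     best_offset = 0
--     best_overlap = -1
--     for offset in (0, 1):
--         overlap = sum(1 for frame in gt_set if (frame + offset) in pred_set)
--         if overlap > best_overlap:
--             best_overlap = overlap
--             best_offset = offset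
--     return best_offset
-- ===== SOURCE B (Python) =====
-- def _infer_frame_offset(pred_numeric_keys, gt_frames):
--     # Sort the distinct frames and count overlaps by merging two sorted lists
--     # with two pointers (no hash-set membership tests at all).
--     ps = sorted(set(pred_numeric_keys))
--     gs = sorted(set(gt_frames))
--
--     def common(xs, ys):
--         i = j = n = 0
--         while i < len(xs) and j < len(ys):
--             if xs[i] < ys[j]:
--                 i += 1
--             elif ys[j] < xs[i]:
--                 j += 1
--             else:
--                 n += 1
--                 i += 1
--                 j += 1
--         return n
--
--     c0 = common(gs, ps)
--     c1 = common([g + 1 for g in gs], ps)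
--     return 1 if c1 > c0 else 0
-- ===== Notes on version B (the rewrite author's own statement) =====
-- stated objective: alternative
-- what changed: Replaces A's hash-set membership counting over offsets (0,1) with sorting the distinct frames and counting each overlap by a two-pointer merge of two sorted lists (no membership tests), keeping A's strict tie-break that returns 0 on ties.
import Mathlib
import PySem

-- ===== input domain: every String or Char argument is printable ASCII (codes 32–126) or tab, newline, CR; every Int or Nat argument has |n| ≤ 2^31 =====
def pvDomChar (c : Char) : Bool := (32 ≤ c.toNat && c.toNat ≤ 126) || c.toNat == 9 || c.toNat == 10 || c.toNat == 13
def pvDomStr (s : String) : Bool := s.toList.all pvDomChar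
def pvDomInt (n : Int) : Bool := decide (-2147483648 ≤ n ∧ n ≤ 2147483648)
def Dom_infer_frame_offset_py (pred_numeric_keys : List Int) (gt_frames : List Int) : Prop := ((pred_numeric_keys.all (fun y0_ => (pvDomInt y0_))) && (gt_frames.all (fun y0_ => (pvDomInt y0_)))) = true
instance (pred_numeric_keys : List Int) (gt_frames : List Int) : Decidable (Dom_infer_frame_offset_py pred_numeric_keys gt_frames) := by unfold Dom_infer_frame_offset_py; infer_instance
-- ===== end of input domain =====

-- B replaces A's hash-set membership counting with sort-distinct + two-pointer merge counting; objective: alternative.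


-- ===== PORT A =====
def infer_frame_offset_py (pred_numeric_keys : List Int) (gt_frames : List Int) : Int :=
  let pred_set : PySem.Set Int := PySem.Set.ofList pred_numeric_keys
  let gt_set : PySem.Set Int := PySem.Set.ofList gt_frames
  -- 'for offset in (0, 1):' with state (best_offset, best_overlap), starting (0, -1)
  (([(0:Int), 1]).foldl
    (fun (st : Int × Int) (offset : Int) =>
      -- overlap = sum(1 for frame in gt_set if (frame + offset) in pred_set)  (order-independent sum)
      let overlap : Int :=
        gt_set.foldl (fun acc frame => if PySem.Set.contains pred_set (frame + offset) then acc + 1 else acc) 0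
      if overlap > st.2 then (offset, overlap) else st)
    (0, -1)).1

-- ===== PORT B =====
-- two-pointer merge over two sorted lists, counting common elements (Source B's 'common')
def pvCommon : List Int → List Int → Int
  | [], _ => 0
  | _ :: _, [] => 0
  | x :: xs, y :: ys =>
    if x < y then pvCommon xs (y :: ys)
    else if y < x then pvCommon (x :: xs) ys
    else 1 + pvCommon xs ys

def infer_frame_offset_py_alt (pred_numeric_keys : List Int) (gt_frames : List Int) : Int :=
  let ps := PySem.List.sorted (PySem.Set.ofList pred_numeric_keys) (fun x => x) false
  let gs := PySem.List.sorted (PySem.Set.ofList gt_frames) (fun x => x) false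
  let c0 := pvCommon gs ps
  let c1 := pvCommon (gs.map (fun g => g + 1)) ps
  if c1 > c0 then 1 else 0

-- ===== PRECONDITION & SPEC =====
def Spec_infer_frame_offset_py (pred_numeric_keys : List Int) (gt_frames : List Int) (out : Int) : Prop := out = infer_frame_offset_py_alt pred_numeric_keys gt_frames
instance (pred_numeric_keys : List Int) (gt_frames : List Int) (out : Int) : Decidable (Spec_infer_frame_offset_py pred_numeric_keys gt_frames out) := by unfold Spec_infer_frame_offset_py; infer_instance

-- ===== CLAIM =====
def Claim_equal_infer_frame_offset_py : Prop := ∀ (pred_numeric_keys : List Int) (gt_frames : List Int), Dom_infer_frame_offset_py pred_numeric_keys gt_frames → Spec_infer_frame_offset_py pred_numeric_keys gt_frames (infer_frame_offset_py pred_numeric_keys gt_frames)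

-- ===== LEMMAS AND PROOFS =====

-- On strictly increasing lists, the two-pointer merge count is the number of
-- elements of xs that occur in ys.
theorem pvCommon_eq_countP (xs ys : List Int)
    (hx : xs.Pairwise (· < ·)) (hy : ys.Pairwise (· < ·)) :
    pvCommon xs ys = ((xs.countP (fun x => decide (x ∈ ys)) : Nat) : Int) := by
  induction xs, ys using pvCommon.induct with
  | case1 ys => simp [pvCommon]
  | case2 x xs => simp [pvCommon]
  | case3 x xs y ys hlt ih =>
    -- x < y: x is smaller than every element of y :: ys, so it is not a member
    have hxmem : x ∉ y :: ys := by
      intro hmem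
      rcases List.mem_cons.mp hmem with h | h
      · omega
      · have := (List.pairwise_cons.mp hy).1 _ h; omega
    rw [pvCommon, if_pos hlt, ih hx.tail hy, List.countP_cons]
    simp [hxmem]
  | case4 x xs y ys hnlt hlt ih =>
    -- y < x: y is below every element of x :: xs, so membership in ys suffices
    rw [pvCommon, if_neg hnlt, if_pos hlt, ih hx hy.tail]
    congr 1
    refine List.countP_congr ?_
    intro z hz
    have hxz : x ≤ z := by
      rcases List.mem_cons.mp hz with rfl | h
      · omega
      · exact le_of_lt ((List.pairwise_cons.mp hx).1 _ h)
    simp only [decide_eq_true_eq]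
    constructor
    · intro h
      exact List.mem_cons_of_mem _ h
    · intro h
      rcases List.mem_cons.mp h with hzy | h2
      · exact absurd hzy (by omega)
      · exact h2
  | case5 x xs y ys hnlt hnlt' ih =>
    -- x = y: one common element, tails carry on
    have hxy : x = y := by omega
    subst hxy
    have htail : xs.countP (fun z => decide (z ∈ x :: ys)) = xs.countP (fun z => decide (z ∈ ys)) := by
      refine List.countP_congr ?_
      intro z hz
      have hxz : x < z := (List.pairwise_cons.mp hx).1 _ hz
      simp only [decide_eq_true_eq]
      constructor
      · intro h
        rcases List.mem_cons.mp h with hzy | h2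
        · exact absurd hzy (by omega)
        · exact h2
      · intro h
        exact List.mem_cons_of_mem _ h
    rw [pvCommon, if_neg hnlt, if_neg hnlt', ih hx.tail hy.tail, List.countP_cons, htail]
    have hpx : decide (x ∈ x :: ys) = true := by simp
    rw [hpx]
    simp only [if_true]
    omega

-- ===== VERDICT =====
theorem infer_frame_offset_py_spec : Claim_equal_infer_frame_offset_py := by
  intro pred gt _
  unfold Spec_infer_frame_offset_py infer_frame_offset_py infer_frame_offset_py_alt
  simp only [List.foldl_cons, List.foldl_nil]
  set P : PySem.Set Int := PySem.Set.ofList pred with hP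
  set G : PySem.Set Int := PySem.Set.ofList gt with hG
  set ps := PySem.List.sorted P (fun x => x) false with hps
  set gs := PySem.List.sorted G (fun x => x) false with hgs
  have hpsP : ps.Pairwise (· < ·) := PySem.List.sorted_ofList_pairwise_lt (xs := pred)
  have hgsP : gs.Pairwise (· < ·) := PySem.List.sorted_ofList_pairwise_lt (xs := gt)
  have hpermg : gs.Perm G := PySem.List.sorted_perm ..
  have hmemps : ∀ z : Int, (z ∈ ps) ↔ z ∈ P := fun z => PySem.List.mem_sorted ..
  -- A's overlap at offset o as a countP over the gt set
  have hov : ∀ o : Int,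
      G.foldl (fun acc frame => if PySem.Set.contains P (frame + o) then acc + 1 else acc) 0
        = ((G.countP (fun frame => decide ((frame + o) ∈ P)) : Nat) : Int) := by
    intro o
    rw [PySem.List.foldl_if_add_one]
    simp
  -- B's counters as the same countP
  have hc0 : pvCommon gs ps = ((G.countP (fun frame => decide ((frame + 0) ∈ P)) : Nat) : Int) := by
    rw [pvCommon_eq_countP gs ps hgsP hpsP]
    congr 1
    rw [hpermg.countP_eq]
    refine List.countP_congr ?_
    intro z _
    simp [hmemps z]
  have hc1 : pvCommon (gs.map (fun g => g + 1)) ps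
      = ((G.countP (fun frame => decide ((frame + 1) ∈ P)) : Nat) : Int) := by
    have hmapP : (gs.map (fun g => g + 1)).Pairwise (· < ·) := by
      refine List.Pairwise.map _ ?_ hgsP
      intro a b h; omega
    rw [pvCommon_eq_countP _ ps hmapP hpsP, List.countP_map]
    congr 1
    rw [hpermg.countP_eq]
    refine List.countP_congr ?_
    intro z _
    simp [Function.comp, hmemps]
  rw [hov 0, hov 1, ← hc0, ← hc1]
  have h0 : (0:Int) ≤ pvCommon gs ps := by rw [hc0]; positivity
  rw [if_pos (by omega : pvCommon gs ps > -1)]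
  by_cases h : pvCommon (gs.map (fun g => g + 1)) ps > pvCommon gs ps
  · rw [if_pos h, if_pos h]
  · rw [if_neg h, if_neg h]
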